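-- pv_equiv track=rewrite | github.com/9b2n/coding-test | 프로그래머스/모음사전.py | solution
-- ===== SOURCE A (Python) =====
-- def solution(word):
--     answer = 0
--     alpha = {'A': 0, 'E': 1, 'I': 2, 'O': 3, 'U': 4}
--
--     for i in range(len(word)):
--         gap = 0
--         for j in range(5-i):
--             gap = gap * 5 + 1
--         answer += (alpha[word[i]] * gap + 1)
--
--     return answer
--
-- word = 	"EIO"
-- ===== SOURCE B (Python) =====
-- def solution(word):
--     answer = 0
--     alpha = {'A': 0, 'E': 1, 'I': 2, 'O': 3, 'U': 4}
--     for i, c in enumerate(word):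
--         e = 5 - i
--         gap = (5 ** e - 1) // 4 if e > 0 else 0
--         answer += alpha[c] * gap + 1
--     return answer
-- ===== Notes on version B (the rewrite author's own statement) =====
-- stated objective: simpler
-- what changed: The inner geometric-accumulation loop is replaced by the closed form (5**e - 1)//4 for the subtree size, and the outer loop iterates directly over enumerate(word) instead of indexing by range(len(word)).
import Mathlib
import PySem

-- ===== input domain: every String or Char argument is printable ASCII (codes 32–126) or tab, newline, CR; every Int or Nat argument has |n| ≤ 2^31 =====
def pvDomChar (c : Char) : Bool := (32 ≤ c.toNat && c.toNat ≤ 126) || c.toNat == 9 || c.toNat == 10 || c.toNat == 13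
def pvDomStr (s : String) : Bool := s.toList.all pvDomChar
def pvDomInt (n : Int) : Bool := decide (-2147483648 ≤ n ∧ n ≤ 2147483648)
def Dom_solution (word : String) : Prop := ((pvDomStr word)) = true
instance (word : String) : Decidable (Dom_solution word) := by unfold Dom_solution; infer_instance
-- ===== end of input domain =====

-- B replaces A's inner geometric-accumulation loop by the closed form (5^e - 1)/4
-- and iterates over enumerate(word) instead of indexing by range(len(word)); objective: simpler.

-- ===== PORT A =====
def pvAlpha : PySem.Dict Char Int :=
  PySem.Dict.ofList [('A', 0), ('E', 1), ('I', 2), ('O', 3), ('U', 4)]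

def solution (word : String) : Int :=
  (PySem.List.pyRange 0 (word.toList.length : Int) 1).foldl
    (fun answer i =>
      let gap := (PySem.List.pyRange 0 (5 - i) 1).foldl (fun g _ => g * 5 + 1) 0
      answer + (pvAlpha.getD (PySem.List.pyGetD word.toList i ' ') 0 * gap + 1)) 0

-- ===== PORT B =====
def solution_alt (word : String) : Int :=
  (PySem.List.enumerate word.toList 0).foldl
    (fun answer p =>
      let e : Int := 5 - p.1
      let gap : Int := if e > 0 then (5 ^ e.toNat - 1) / 4 else 0
      answer + (pvAlpha.getD p.2 0 * gap + 1)) 0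

-- ===== PRECONDITION & SPEC =====
-- A raises KeyError on any character outside AEIOU; Pre_ admits exactly the vowel-only words.
def Pre_solution (word : String) : Prop :=
  (word.toList.all (fun c => c ∈ (['A', 'E', 'I', 'O', 'U'] : List Char))) = true
instance (word : String) : Decidable (Pre_solution word) := by unfold Pre_solution; infer_instance
def pvWitness_solution : String := "EIO"

def Spec_solution (word : String) (out : Int) : Prop := out = solution_alt word
instance (word : String) (out : Int) : Decidable (Spec_solution word out) := by unfold Spec_solution; infer_instance

-- ===== CLAIM (what is proved, stated in full; the proofs are below) =====
def Claim_equal_solution : Prop :=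
  ∀ (word : String), Dom_solution word → Pre_solution word → Spec_solution word (solution word)

-- ===== LEMMAS AND PROOFS =====

-- A's inner loop equals B's closed form, for any nonnegative index.
theorem pv_gap_eq (i : Int) (hi : 0 ≤ i) :
    (PySem.List.pyRange 0 (5 - i) 1).foldl (fun g _ => g * 5 + 1) 0
      = (if (5 - i) > 0 then ((5 : Int) ^ (5 - i).toNat - 1) / 4 else 0) := by
  by_cases h5 : 5 ≤ i
  · rw [PySem.List.pyRange_one_eq_nil (by omega)]
    simp; omega
  · interval_cases i <;> decide

theorem solution_eq_alt (word : String) (hp : Pre_solution word) :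
    solution word = solution_alt word := by
  unfold solution solution_alt
  rw [PySem.List.enumerate_eq_map_pyRange word.toList ' ', List.foldl_map]
  simp only [PySem.List.len_eq]
  apply PySem.List.foldl_congr_mem
  intro acc i hi
  have h0 : 0 ≤ i := by
    have := (PySem.List.mem_pyRange_one).1 hi
    omega
  simp only [pv_gap_eq i h0]

-- ===== VERDICT (by name: the statement is the Claim_ definition above) =====
theorem solution_spec : Claim_equal_solution := by
  intro word _ hp
  exact solution_eq_alt word hp
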